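-- pv_equiv track=rewrite | github.com/devdw98/AlgorithmCode | greedy/chap11/_my-joystick.py | solution
-- ===== SOURCE A (Python) =====
-- def solution(s) -> int:
--     answer = 0
--     count = 0
--     for c in s:
--         count += c == 'L'
--         count -= c == 'R'
--         answer += count == 0
--
--     return answer
-- ===== SOURCE B (Python) =====
-- def solution(s) -> int:
--     # A prefix has balance 0 iff the balance of the remaining suffix equals the
--     # total balance of the whole string.  So compute the total once, then walk
--     # the string BACKWARDS maintaining the suffix balance and count the
--     # positions where it equals the total.
--     total = sum((c == 'L') - (c == 'R') for c in s)
--     answer = 0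
--     suffix = 0
--     for c in reversed(s):
--         answer += suffix == total
--         suffix += (c == 'L') - (c == 'R')
--     return answer
-- ===== Notes on version B (the rewrite author's own statement) =====
-- stated objective: alternative
-- what changed: Instead of A's forward scan counting zero prefix balances, B first computes the total L/R balance and then traverses the string backwards, counting positions where the suffix balance equals the total (equivalent since prefix balance = total - suffix balance).
import Mathlib
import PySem

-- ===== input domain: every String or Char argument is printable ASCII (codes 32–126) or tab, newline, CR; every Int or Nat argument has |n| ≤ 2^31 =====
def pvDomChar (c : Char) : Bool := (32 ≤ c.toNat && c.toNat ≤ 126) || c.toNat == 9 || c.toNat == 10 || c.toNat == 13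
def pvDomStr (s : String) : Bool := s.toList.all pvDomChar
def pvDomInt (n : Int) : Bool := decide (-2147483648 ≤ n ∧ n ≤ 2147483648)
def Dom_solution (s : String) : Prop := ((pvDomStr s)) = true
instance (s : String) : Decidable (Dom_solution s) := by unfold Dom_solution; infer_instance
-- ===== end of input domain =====

-- B computes the total L/R balance first and then scans the string backwards,
-- counting positions where the suffix balance equals the total, instead of A's
-- forward scan counting zero prefix balances.

-- ===== PORT A =====
-- fused forward loop: count tracks the L/R balance, answer counts prefixes with balance 0
def solution (s : String) : Int :=
  (s.toList.foldl
    (fun (st : Int × Int) c =>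
      let count := st.2 + (if c == 'L' then 1 else 0) - (if c == 'R' then 1 else 0)
      (st.1 + (if count == 0 then 1 else 0), count))
    (0, 0)).1

-- ===== PORT B =====
-- total balance first, then a backward scan comparing the suffix balance to the total
def solution_alt (s : String) : Int :=
  let total := s.toList.foldl
    (fun (a : Int) c => a + ((if c == 'L' then (1 : Int) else 0) - (if c == 'R' then 1 else 0))) 0
  (s.toList.reverse.foldl
    (fun (st : Int × Int) c =>
      (st.1 + (if st.2 == total then 1 else 0),
       st.2 + (if c == 'L' then 1 else 0) - (if c == 'R' then 1 else 0)))
    (0, 0)).1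

-- ===== PRECONDITION & SPEC =====
def Spec_solution (s : String) (out : Int) : Prop := out = solution_alt s
instance (s : String) (out : Int) : Decidable (Spec_solution s out) := by unfold Spec_solution; infer_instance

-- ===== CLAIM (what is proved, stated in full; the proofs are below) =====
def Claim_equal_solution : Prop := ∀ (s : String), Dom_solution s → Spec_solution s (solution s)

-- ===== LEMMAS AND PROOFS =====

def pvDelta (c : Char) : Int := (if c == 'L' then (1 : Int) else 0) - (if c == 'R' then 1 else 0)

def pvScan (c : Int) : List Int → List Int
  | [] => []
  | d :: l => (c + d) :: pvScan (c + d) l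

def pvZ (l : List Int) : Int := l.foldl (fun a v => a + (if v == 0 then 1 else 0)) 0

-- pvZ_cons is proved below pvZ_shift
-- number of proper prefixes of d whose running sum started at s hits t (tested before each step)
def pvN (t : Int) : List Int → Int → Int
  | [], _ => 0
  | d :: l, s => (if s == t then 1 else 0) + pvN t l (s + d)

lemma pvZ_shift (l : List Int) (a : Int) :
    l.foldl (fun a v => a + (if v == 0 then 1 else 0)) a = a + pvZ l := by
  induction l generalizing a with
  | nil => simp [pvZ]
  | cons x l ih =>
      simp only [pvZ, List.foldl]
      rw [ih, ih]; ring

lemma pvZ_cons (x : Int) (l : List Int) :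
    pvZ (x :: l) = pvZ l + (if x == 0 then 1 else 0) := by
  rw [show pvZ (x :: l)
        = List.foldl (fun a v => a + (if v == 0 then 1 else 0)) ((0:Int) + (if x == 0 then 1 else 0)) l
      from rfl, pvZ_shift]
  ring

lemma pvA_scan (l : List Char) (a c : Int) :
    (l.foldl
      (fun (st : Int × Int) ch =>
        let count := st.2 + (if ch == 'L' then 1 else 0) - (if ch == 'R' then 1 else 0)
        (st.1 + (if count == 0 then 1 else 0), count))
      (a, c)).1
      = a + pvZ (pvScan c (l.map pvDelta)) := by
  induction l generalizing a c with
  | nil => simp [pvZ, pvScan]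
  | cons ch l ih =>
      simp only [List.foldl, List.map, pvScan]
      rw [ih]
      have h : c + (if ch == 'L' then (1:Int) else 0) - (if ch == 'R' then 1 else 0)
           = c + pvDelta ch := by unfold pvDelta; ring
      rw [h]
      simp only [pvZ, List.foldl]
      rw [pvZ_shift, pvZ_shift]
      ring

lemma pvTotal_fold (l : List Char) (a : Int) :
    l.foldl (fun (a : Int) c => a + ((if c == 'L' then (1 : Int) else 0) - (if c == 'R' then 1 else 0))) a
      = a + (l.map pvDelta).sum := by
  induction l generalizing a with
  | nil => simp
  | cons c l ih =>
      simp only [List.foldl, List.map, List.sum_cons]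
      rw [ih]
      unfold pvDelta; ring

lemma pvB_fold (m : List Char) (a s t : Int) :
    (m.foldl
      (fun (st : Int × Int) c =>
        (st.1 + (if st.2 == t then 1 else 0),
         st.2 + (if c == 'L' then 1 else 0) - (if c == 'R' then 1 else 0)))
      (a, s)).1
      = a + pvN t (m.map pvDelta) s := by
  induction m generalizing a s with
  | nil => simp [pvN]
  | cons c m ih =>
      simp only [List.foldl, List.map, pvN]
      rw [ih]
      have h : s + (if c == 'L' then (1:Int) else 0) - (if c == 'R' then 1 else 0)
           = s + pvDelta c := by unfold pvDelta; ring
      rw [h]; ring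

lemma pvN_snoc (t : Int) (m : List Int) (x s : Int) :
    pvN t (m ++ [x]) s = pvN t m s + (if s + m.sum == t then 1 else 0) := by
  induction m generalizing s with
  | nil => simp [pvN]
  | cons d m ih =>
      simp only [List.cons_append, pvN, List.sum_cons, ih]
      have e : ((s + (d + m.sum) == t) : Bool) = ((s + d + m.sum == t) : Bool) := by
        by_cases hc : s + d + m.sum = t
        · simp [hc, show s + (d + m.sum) = t by omega]
        · simp [hc, show ¬ s + (d + m.sum) = t by omega]
      simp only [e]; ring

lemma pvN_reverse (d : List Int) (s t : Int) :
    pvN t d.reverse s = pvZ (pvScan (t - s - d.sum) d) := by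
  induction d generalizing s t with
  | nil => simp [pvN, pvScan, pvZ]
  | cons x d ih =>
      rw [List.reverse_cons, pvN_snoc, List.sum_reverse, ih]
      simp only [pvScan, List.sum_cons]
      rw [pvZ_cons]
      have h1 : t - s - (x + d.sum) + x = t - s - d.sum := by ring
      rw [h1]
      have h2 : ((s + d.sum == t) : Bool) = ((t - s - d.sum == 0) : Bool) := by
        by_cases h : s + d.sum = t
        · have h' : t - s - d.sum = 0 := by omega
          simp [h, h']
        · have h' : t - s - d.sum ≠ 0 := by omega
          simp [h, h']
      rw [h2]

-- ===== VERDICT (by name: the statement is the Claim_ definition above) =====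
theorem solution_spec : Claim_equal_solution := by
  intro s _
  unfold Spec_solution solution solution_alt
  simp only [pvA_scan, pvB_fold, pvTotal_fold, List.map_reverse, pvN_reverse, zero_add]
  rw [sub_zero, sub_self]
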